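-- pv_equiv track=rewrite | github.com/Scope0204/Programmers_Practice | 2단계/더맵게_Heap.py | solution
-- ===== SOURCE A (Python) =====
-- import heapq
--
-- def solution(scoville, K):
--     answer = 0
--     heapq.heapify(scoville)  # scovile을 힙으로 변환
--
--     while len(scoville) >= 2:
--         if scoville[0] >= K:
--             return answer
--         else:
--             a = heapq.heappop(scoville)  # 힙에서 가장작은 값 삭제 후 값 반환
--             b = heapq.heappop(scoville)  # 2개 삭제해야함
--
--             heapq.heappush(scoville, a + (b*2))
--             answer += 1
--
--     if scoville[0] >= K:
--         return answer
--     else: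
--         return -1
-- ===== SOURCE B (Python) =====
-- from collections import deque
--
--
-- def solution(scoville, K):
--     # Two-queue technique instead of a heap: one queue holds the sorted
--     # originals, the other is a FIFO of merged values.  Merged values are
--     # produced in nondecreasing order (a + 2*b of successive minima never
--     # decreases past a surviving earlier merge), so both queues stay sorted
--     # and the overall minimum is always at the front of one of them:
--     # every step is O(1), no heap or binary insertion needed.
--     # (Works on a sorted copy; does not mutate the caller's list.)
--     orig = deque(sorted(scoville))
--     merged = deque()
--
--     def pop_smallest():
--         if not orig or (merged and merged[0] < orig[0]):
--             return merged.popleft()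
--         return orig.popleft()
--
--     answer = 0
--     while len(orig) + len(merged) >= 2:
--         a = pop_smallest()
--         if a >= K:
--             return answer
--         b = pop_smallest()
--         merged.append(a + 2 * b)
--         answer += 1
--     last = orig[0] if orig else merged[0]
--     return answer if last >= K else -1
-- ===== Notes on version B (the rewrite author's own statement) =====
-- stated objective: faster
-- what changed: Replaces the min-heap with the two-queue trick: sort once into a FIFO of originals and keep a second FIFO of merged values, which provably come out in nondecreasing order (the goodM invariant), so the minimum is always at the front of one of the two queues and every merge step is O(1) with no priority structure at all; B works on a sorted copy instead of mutating the argument. Pre_ excludes the empty list, on which A raises IndexError.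
import Mathlib
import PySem

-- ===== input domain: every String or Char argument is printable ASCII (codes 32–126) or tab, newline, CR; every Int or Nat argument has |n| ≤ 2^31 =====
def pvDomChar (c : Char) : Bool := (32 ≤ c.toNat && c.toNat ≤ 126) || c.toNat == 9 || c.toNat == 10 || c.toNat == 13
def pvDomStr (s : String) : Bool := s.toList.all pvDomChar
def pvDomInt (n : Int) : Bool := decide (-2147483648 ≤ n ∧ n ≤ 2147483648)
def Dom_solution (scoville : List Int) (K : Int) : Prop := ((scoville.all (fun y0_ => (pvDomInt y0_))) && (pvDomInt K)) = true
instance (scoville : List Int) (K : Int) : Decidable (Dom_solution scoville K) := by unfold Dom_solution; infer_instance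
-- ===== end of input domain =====

-- B replaces A's heapq min-heap with the two-queue trick (sorted originals +
-- FIFO of merged values, whose nondecreasing order is proved via the goodM
-- invariant below); A mutates scoville in place (heapify/pop/push) while B
-- works on a sorted copy, so only the RETURN VALUE is compared here.


-- ===== PORT A =====
-- heapq is modelled by its library contract: after heapify, scoville[0] is the
-- minimum; heappop removes and returns the minimum (PySem.List.min?, first
-- occurrence erased); heappush appends the element.  The while loop runs on
-- fuel = length (each iteration shrinks the heap by one, so the fuel is never
-- exhausted from a nonempty start; fuel 0 means the heap was initially empty,
-- where Python raises IndexError — excluded by Pre_solution, port returns -1).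
def loopA (K : Int) : Nat → List Int → Int → Int
  | 0, _, _ => -1
  | fuel + 1, h, ans =>
    if 2 ≤ h.length then
      match PySem.List.min? h (fun x => x) with
      | none => -1
      | some a =>
        if a ≥ K then ans
        else
          match PySem.List.min? (h.erase a) (fun x => x) with
          | none => -1
          | some b => loopA K fuel (((h.erase a).erase b) ++ [a + b * 2]) (ans + 1)
    else
      match h with
      | [] => -1
      | x :: _ => if x ≥ K then ans else -1

def solution (scoville : List Int) (K : Int) : Int := loopA K scoville.length scoville 0

-- ===== PORT B =====
-- pop_smallest: both queues are sorted, so the overall minimum is at the front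
-- of one of them; ties go to orig, exactly as Source B's comparison does.
-- (The [],[] case is unreachable under the loop guard; -default totalizes it.)
def popTQ : List Int → List Int → Int × List Int × List Int
  | [], [] => (0, [], [])
  | [], m :: ms => (m, [], ms)
  | o :: os, [] => (o, os, [])
  | o :: os, m :: ms => if m < o then (m, o :: os, ms) else (o, os, m :: ms)

-- Source B's while loop on fuel = total length (one element fewer per iteration)
def loopTQ (K : Int) : Nat → List Int → List Int → Int → Int
  | 0, _, _, _ => -1
  | fuel + 1, O, M, ans =>
    if 2 ≤ O.length + M.length then
      let p := popTQ O M
      if p.1 ≥ K then ans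
      else
        let q := popTQ p.2.1 p.2.2
        loopTQ K fuel q.2.1 (q.2.2 ++ [p.1 + 2 * q.1]) (ans + 1)
    else
      match O, M with
      | x :: _, _ => if x ≥ K then ans else -1
      | [], m :: _ => if m ≥ K then ans else -1
      | [], [] => -1

def solution_alt (scoville : List Int) (K : Int) : Int :=
  loopTQ K scoville.length (PySem.List.sorted scoville (fun x => x) false) [] 0

-- ===== PRECONDITION & SPEC =====
-- Pre_ excludes only the empty list, on which A raises IndexError (scoville[0]).
def Pre_solution (scoville : List Int) (K : Int) : Prop := scoville ≠ []
instance (scoville : List Int) (K : Int) : Decidable (Pre_solution scoville K) := by unfold Pre_solution; infer_instance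
def pvWitness_solution : List Int × Int := ([1, 2, 3, 9, 10, 12], 7)

def Spec_solution (scoville : List Int) (K : Int) (out : Int) : Prop := out = solution_alt scoville K
instance (scoville : List Int) (K : Int) (out : Int) : Decidable (Spec_solution scoville K out) := by unfold Spec_solution; infer_instance

-- ===== CLAIM (what is proved, stated in full; the proofs are below) =====
def Claim_equal_solution : Prop := ∀ (scoville : List Int) (K : Int), Dom_solution scoville K → Pre_solution scoville K → Spec_solution scoville K (solution scoville K)

-- ===== LEMMAS AND PROOFS =====

-- goodM O M: every merged value is bounded by u + 2*v for any two elements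
-- u ≤ v drawn from what preceded it (the originals O plus earlier merges).
-- This is the invariant that keeps the merged FIFO sorted.
def goodM : List Int → List Int → Prop
  | _, [] => True
  | O, x :: rest => (∀ u v : Int, [u, v].Subperm O → u ≤ v → x ≤ u + 2 * v) ∧ goodM (O ++ [x]) rest

theorem subperm_append_one (O' O : List Int) (x : Int) (h : List.Subperm O' O) :
    List.Subperm (O' ++ [x]) (O ++ [x]) := by
  obtain ⟨l, hl1, hl2⟩ := h
  exact ⟨l ++ [x], hl1.append_right [x], hl2.append (List.Sublist.refl [x])⟩

theorem goodM_anti : ∀ (M O O' : List Int), List.Subperm O' O → goodM O M → goodM O' M := by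
  intro M
  induction M with
  | nil => intro O O' _ _; trivial
  | cons x rest ih =>
    intro O O' hsub hG
    exact ⟨fun u v h huv => hG.1 u v (h.trans hsub) huv,
      ih (O ++ [x]) (O' ++ [x]) (subperm_append_one O' O x hsub) hG.2⟩

theorem goodM_split : ∀ (P O Q : List Int), goodM O (P ++ Q) → goodM (O ++ P) Q := by
  intro P
  induction P with
  | nil => intro O Q h; simpa using h
  | cons p rest ih =>
    intro O Q h
    have h2 : goodM ((O ++ [p]) ++ rest) Q := ih (O ++ [p]) Q h.2
    simpa [List.append_assoc] using h2

theorem goodM_elem : ∀ (M O : List Int) (x : Int), goodM O M → x ∈ M →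
    ∀ u v : Int, [u, v].Subperm O → u ≤ v → x ≤ u + 2 * v := by
  intro M
  induction M with
  | nil => intro O x _ hx; simp at hx
  | cons y rest ih =>
    intro O x hG hx u v hsub huv
    rcases List.mem_cons.mp hx with rfl | hx'
    · exact hG.1 u v hsub huv
    · exact ih (O ++ [y]) x hG.2 hx' u v (List.Subperm.trans hsub (List.sublist_append_left O [y]).subperm) huv

theorem goodM_append_singleton : ∀ (M O : List Int) (m : Int), goodM O M →
    (∀ u v : Int, [u, v].Subperm (O ++ M) → u ≤ v → m ≤ u + 2 * v) →
    goodM O (M ++ [m]) := by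
  intro M
  induction M with
  | nil => intro O m _ hb; exact ⟨fun u v h huv => hb u v (by simpa using h) huv, trivial⟩
  | cons x rest ih =>
    intro O m hG hb
    refine ⟨hG.1, ih (O ++ [x]) m hG.2 ?_⟩
    intro u v h huv
    exact hb u v (by simpa [List.append_assoc] using h) huv

-- the minimum of a multiset, located by membership + lower bound
theorem min?_eq_of (h l : List Int) (a : Int) (hp : h.Perm l) (ha : a ∈ l)
    (hmin : ∀ x ∈ l, a ≤ x) : PySem.List.min? h (fun x => x) = some a := by
  cases hm : PySem.List.min? h (fun x => x) with
  | none =>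
    have : h = [] := (PySem.List.min?_eq_none_iff h (fun x => x)).mp hm
    subst this
    exact absurd (hp.mem_iff.mpr ha) (by simp)
  | some m =>
    have hm_mem : m ∈ l := hp.mem_iff.mp (PySem.List.min?_mem hm)
    have h1 : m ≤ a := by
      simpa using PySem.List.min?_isMin hm a (hp.mem_iff.mpr ha)
    exact congrArg some (le_antisymm h1 (hmin m hm_mem))

-- popTQ on sorted queues: the removed queues are literally (O ++ M).erase a,
-- the returned value is a member and a lower bound, the queues stay sorted,
-- and the shape is "head of O" or "head of M".
theorem popTQ_spec (O M : List Int) (hO : O.Pairwise (· ≤ ·)) (hM : M.Pairwise (· ≤ ·))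
    (hne : O ≠ [] ∨ M ≠ []) :
    (popTQ O M).2.1 ++ (popTQ O M).2.2 = (O ++ M).erase (popTQ O M).1
    ∧ (popTQ O M).1 ∈ O ++ M
    ∧ (∀ x ∈ O ++ M, (popTQ O M).1 ≤ x)
    ∧ (popTQ O M).2.1.Pairwise (· ≤ ·) ∧ (popTQ O M).2.2.Pairwise (· ≤ ·)
    ∧ ((∃ os, O = (popTQ O M).1 :: os ∧ (popTQ O M).2.1 = os ∧ (popTQ O M).2.2 = M)
       ∨ (∃ ms, M = (popTQ O M).1 :: ms ∧ (popTQ O M).2.1 = O ∧ (popTQ O M).2.2 = ms)) := by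
  match O, M with
  | [], [] => simp at hne
  | [], m :: ms =>
    refine ⟨by simp [popTQ], by simp [popTQ], ?_, by simp [popTQ], ?_, Or.inr ⟨ms, by simp [popTQ]⟩⟩
    · intro x hx
      simp only [popTQ]
      rcases List.mem_cons.mp (by simpa using hx) with rfl | hx'
      · exact le_rfl
      · exact List.rel_of_pairwise_cons hM hx'
    · simpa [popTQ] using hM.of_cons
  | o :: os, [] =>
    refine ⟨by simp [popTQ], by simp [popTQ], ?_, ?_, by simp [popTQ], Or.inl ⟨os, by simp [popTQ]⟩⟩
    · intro x hx
      simp only [popTQ]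
      rcases List.mem_cons.mp (by simpa using hx) with rfl | hx'
      · exact le_rfl
      · exact List.rel_of_pairwise_cons hO hx'
    · simpa [popTQ] using hO.of_cons
  | o :: os, m :: ms =>
    by_cases hcmp : m < o
    · have hnotin : m ∉ o :: os := by
        intro hmem
        rcases List.mem_cons.mp hmem with rfl | h'
        · omega
        · have := List.rel_of_pairwise_cons hO h'; omega
      refine ⟨?_, by simp [popTQ, hcmp], ?_, by simp [popTQ, hcmp, hO],
        ?_, Or.inr ⟨ms, by simp [popTQ, hcmp]⟩⟩
      · simp only [popTQ, if_pos hcmp]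
        rw [List.erase_append_right _ hnotin]
        simp
      · intro x hx
        simp only [popTQ, if_pos hcmp]
        rcases List.mem_append.mp hx with hx' | hx'
        · rcases List.mem_cons.mp hx' with rfl | hx''
          · omega
          · have := List.rel_of_pairwise_cons hO hx''; omega
        · rcases List.mem_cons.mp hx' with rfl | hx''
          · exact le_rfl
          · exact List.rel_of_pairwise_cons hM hx''
      · simpa [popTQ, hcmp] using hM.of_cons
    · refine ⟨by simp [popTQ, hcmp], by simp [popTQ, hcmp], ?_,
        ?_, by simp [popTQ, hcmp, hM], Or.inl ⟨os, by simp [popTQ, hcmp]⟩⟩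
      · intro x hx
        simp only [popTQ, if_neg hcmp]
        rcases List.mem_append.mp hx with hx' | hx'
        · rcases List.mem_cons.mp hx' with rfl | hx''
          · exact le_rfl
          · exact List.rel_of_pairwise_cons hO hx''
        · rcases List.mem_cons.mp hx' with rfl | hx''
          · omega
          · have := List.rel_of_pairwise_cons hM hx''; omega
      · simpa [popTQ, hcmp] using hO.of_cons

-- the main loop equivalence: the heap h is any arrangement of O ++ M
theorem loop_eq (K : Int) : ∀ n (h O M : List Int) (ans : Int),
    h.length = n → h.Perm (O ++ M) → O.Pairwise (· ≤ ·) → M.Pairwise (· ≤ ·) →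
    goodM O M → loopA K n h ans = loopTQ K n O M ans := by
  intro n
  induction n with
  | zero => intro h O M ans hn hp _ _ _; rfl
  | succ n ih =>
    intro h O M ans hn hp hO hM hG
    have hhl : h.length = O.length + M.length := by simpa using hp.length_eq
    by_cases hlen : 2 ≤ O.length + M.length
    · -- loop body runs
      have hne : O ≠ [] ∨ M ≠ [] := by
        rcases O with _ | ⟨o, os⟩
        · right; intro hMe; subst hMe; simp at hlen
        · left; simp
      obtain ⟨he1, hmem1, hmin1, hO1, hM1, hsh1⟩ := popTQ_spec O M hO hM hne
      set a := (popTQ O M).1 with ha_def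
      set O1 := (popTQ O M).2.1 with hO1_def
      set M1 := (popTQ O M).2.2 with hM1_def
      have hne1 : O1 ≠ [] ∨ M1 ≠ [] := by
        have hlen_erase : ((O ++ M).erase a).length = (O ++ M).length - 1 :=
          List.length_erase_of_mem hmem1
        have hl1 := congrArg List.length he1
        simp only [List.length_append] at hl1 hlen_erase
        rcases O1 with _ | ⟨x, xs⟩
        · right; intro hMe; rw [hMe] at hl1; simp at hl1; omega
        · left; simp
      obtain ⟨he2, hmem2, hmin2, hO2, hM2, hsh2⟩ := popTQ_spec O1 M1 hO1 hM1 hne1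
      set b := (popTQ O1 M1).1 with hb_def
      set O2 := (popTQ O1 M1).2.1 with hO2_def
      set M2 := (popTQ O1 M1).2.2 with hM2_def
      have hminA : PySem.List.min? h (fun x => x) = some a :=
        min?_eq_of h (O ++ M) a hp hmem1 hmin1
      have hpe1 : (h.erase a).Perm (O1 ++ M1) := by
        have := hp.erase a
        rwa [← he1] at this
      have hminB : PySem.List.min? (h.erase a) (fun x => x) = some b :=
        min?_eq_of (h.erase a) (O1 ++ M1) b hpe1 hmem2 hmin2
      have hpe2 : ((h.erase a).erase b).Perm (O2 ++ M2) := by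
        have := hpe1.erase b
        rwa [← he2] at this
      have hab : a ≤ b := hmin1 b (by
        have : b ∈ (O ++ M).erase a := by rw [← he1]; exact hmem2
        exact List.mem_of_mem_erase this)
      have hgeb : ∀ x ∈ O2 ++ M2, b ≤ x := by
        intro x hx
        apply hmin2
        have : x ∈ (O1 ++ M1).erase b := by rw [← he2]; exact hx
        exact List.mem_of_mem_erase this
      -- every surviving merged value is ≤ a + 2*b (via goodM on the OLD state),
      -- and goodM survives the two pops
      have hkey : (∀ x ∈ M2, x ≤ a + 2 * b) ∧ goodM O2 M2 := by
        rcases hsh1 with ⟨os, hOsh, hO1e, hM1e⟩ | ⟨ms, hMsh, hO1e, hM1e⟩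
        · rcases hsh2 with ⟨os2, hOsh2, hO2e, hM2e⟩ | ⟨ms2, hMsh2, hO2e, hM2e⟩
          · -- both pops from O: O = a :: b :: os2, M2 = M1 = M
            have hOsh' : O = a :: b :: os2 := by rw [hOsh, ← hO1e, hOsh2]
            have hMe : M2 = M := hM2e.trans hM1e
            constructor
            · intro x hx
              rw [hMe] at hx
              refine goodM_elem M O x hG hx a b ?_ hab
              rw [hOsh']
              exact (List.cons_sublist_cons.mpr (List.cons_sublist_cons.mpr
                (List.nil_sublist os2))).subperm
            · rw [hMe, hO2e]
              refine goodM_anti M O os2 ?_ hG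
              rw [hOsh']
              exact ((List.sublist_cons_self b os2).trans
                (List.sublist_cons_self a (b :: os2))).subperm
          · -- a from O, b from M: O = a :: os, M = b :: ms2
            have hGs : goodM (O ++ [b]) ms2 := by
              refine goodM_split [b] O ms2 ?_
              show goodM O (b :: ms2)
              rw [← hMsh2, hM1e]
              exact hG
            have hpair : List.Subperm [a, b] (O ++ [b]) := by
              rw [hOsh]
              exact (List.Sublist.append
                (List.cons_sublist_cons.mpr (List.nil_sublist os))
                (List.Sublist.refl [b])).subperm
            constructor
            · intro x hx
              rw [hM2e] at hx
              exact goodM_elem ms2 (O ++ [b]) x hGs hx a b hpair hab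
            · rw [hM2e, hO2e, hO1e]
              refine goodM_anti ms2 (O ++ [b]) os ?_ hGs
              rw [hOsh]
              exact ((List.sublist_cons_self a os).trans
                (List.sublist_append_left (a :: os) [b])).subperm
        · rcases hsh2 with ⟨os2, hOsh2, hO2e, hM2e⟩ | ⟨ms2, hMsh2, hO2e, hM2e⟩
          · -- a from M, b from O: M = a :: ms, O = b :: os2
            have hOsh' : O = b :: os2 := by rw [← hO1e, hOsh2]
            have hMe : M2 = ms := hM2e.trans hM1e
            have hGs : goodM (O ++ [a]) ms := by
              refine goodM_split [a] O ms ?_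
              show goodM O (a :: ms)
              rw [← hMsh]
              exact hG
            have hpair : List.Subperm [a, b] (O ++ [a]) := by
              refine ⟨[b, a], List.Perm.swap a b [], ?_⟩
              rw [hOsh']
              exact List.Sublist.append
                (List.cons_sublist_cons.mpr (List.nil_sublist os2))
                (List.Sublist.refl [a])
            constructor
            · intro x hx
              rw [hMe] at hx
              exact goodM_elem ms (O ++ [a]) x hGs hx a b hpair hab
            · rw [hMe, hO2e]
              refine goodM_anti ms (O ++ [a]) os2 ?_ hGs
              rw [hOsh']
              exact ((List.sublist_cons_self b os2).trans
                (List.sublist_append_left (b :: os2) [a])).subperm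
          · -- both pops from M: M = a :: b :: ms2
            have hGs : goodM (O ++ [a, b]) ms2 := by
              refine goodM_split [a, b] O ms2 ?_
              show goodM O (a :: b :: ms2)
              rw [← hMsh2, hM1e, ← hMsh]
              exact hG
            constructor
            · intro x hx
              rw [hM2e] at hx
              exact goodM_elem ms2 (O ++ [a, b]) x hGs hx a b
                (List.sublist_append_right O [a, b]).subperm hab
            · rw [hM2e, hO2e, hO1e]
              exact goodM_anti ms2 (O ++ [a, b]) O
                (List.sublist_append_left O [a, b]).subperm hGs
      obtain ⟨hbound, hG2⟩ := hkey
      -- lengths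
      have hlh : 2 ≤ h.length := by omega
      have hlerase : (h.erase a).length = h.length - 1 :=
        List.length_erase_of_mem (hp.mem_iff.mpr hmem1)
      have hlerase2 : ((h.erase a).erase b).length = (h.erase a).length - 1 :=
        List.length_erase_of_mem (hpe1.mem_iff.mpr hmem2)
      have hl2 : (O2 ++ M2).length = h.length - 2 := by
        have := hpe2.length_eq
        omega
      -- unfold both loops one step
      simp only [loopA, loopTQ, hminA, hminB, if_pos hlh, if_pos hlen]
      rw [← ha_def, ← hb_def, ← hO1_def, ← hM1_def, ← hO2_def, ← hM2_def]
      by_cases hK : a ≥ K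
      · rw [if_pos hK, if_pos hK]
      · rw [if_neg hK, if_neg hK]
        apply ih
        · simp only [List.length_append, List.length_cons, List.length_nil]
          omega
        · have hv : a + b * 2 = a + 2 * b := by ring
          rw [hv, ← List.append_assoc]
          exact hpe2.append_right [a + 2 * b]
        · exact hO2
        · refine List.pairwise_append.mpr ⟨hM2, List.pairwise_singleton _ _, ?_⟩
          intro x hx y hy
          rcases List.mem_singleton.mp hy with rfl
          exact hbound x hx
        · refine goodM_append_singleton M2 O2 (a + 2 * b) hG2 ?_
          intro u v hsub huv
          have hu : u ∈ O2 ++ M2 := List.Subperm.subset hsub (by simp)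
          have hv : v ∈ O2 ++ M2 := List.Subperm.subset hsub (by simp)
          have := hgeb u hu
          have := hgeb v hv
          omega
    · -- loop exits: at most one element remains
      rcases O with _ | ⟨o, os⟩
      · rcases M with _ | ⟨m, ms⟩
        · have : h = [] := by simpa using hp.eq_nil
          subst this
          simp [loopA, loopTQ]
        · have hms : ms = [] := by
            cases ms with
            | nil => rfl
            | cons _ _ => exfalso; simp only [List.length_cons, List.length_append] at hlen; omega
          subst hms
          have : h = [m] := List.perm_singleton.mp (by simpa using hp)
          subst this
          simp [loopA, loopTQ]
      · have h1 : os = [] := by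
          cases os with
          | nil => rfl
          | cons _ _ => exfalso; simp only [List.length_cons, List.length_append] at hlen; omega
        have h2 : M = [] := by
          cases M with
          | nil => rfl
          | cons _ _ => subst h1; exfalso; simp only [List.length_cons, List.length_append] at hlen; omega
        subst h1; subst h2
        have : h = [o] := List.perm_singleton.mp (by simpa using hp)
        subst this
        simp [loopA, loopTQ]

-- ===== VERDICT (by name: the statement is the Claim_ definition above) =====
theorem solution_spec : Claim_equal_solution := by
  intro scoville K _ _
  unfold Spec_solution solution solution_alt
  refine loop_eq K scoville.length scoville
    (PySem.List.sorted scoville (fun x => x) false) [] 0 rfl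
    (by simpa using (PySem.List.sorted_perm ..).symm)
    (by simpa using PySem.List.sorted_pairwise scoville (fun x => x))
    (List.Pairwise.nil)
    trivial
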